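-- pv_equiv track=rewrite | github.com/Av7danger/Vulnbuster | core/chain.py | _assess_chain_risk
-- ===== SOURCE A (Python) =====
-- from typing import Dict, Any, List, Optional, Tuple
--
-- def _assess_chain_risk(chain_vulns: List[Dict[str, Any]]) -> str:
--     """Assess the risk level of an exploit chain"""
--     high_risk_steps = ['rce', 'command_injection', 'file_upload', 'sqli']
--     medium_risk_steps = ['xss', 'idor', 'lfi', 'ssrf']
--
--     high_count = sum(1 for step in chain_vulns if any(risk in step['step'] for risk in high_risk_steps))
--     medium_count = sum(1 for step in chain_vulns if any(risk in step['step'] for risk in medium_risk_steps))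
--
--     if high_count >= 2:
--         return 'critical'
--     elif high_count >= 1 or medium_count >= 2:
--         return 'high'
--     elif medium_count >= 1:
--         return 'medium'
--     else:
--         return 'low'
-- ===== SOURCE B (Python) =====
-- def _assess_chain_risk(chain_vulns):
--     """Assess the risk level of an exploit chain"""
--     def _rank(step):
--         s = step['step']
--         if any(k in s for k in ('rce', 'command_injection', 'file_upload', 'sqli')):
--             return 2
--         if any(k in s for k in ('xss', 'idor', 'lfi', 'ssrf')):
--             return 1
--         return 0
--
--     # Selection scan: keep the two largest per-step severity ranks, classify
--     # by their sum (4 -> critical, 2..3 -> high, 1 -> medium, 0 -> low).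
--     best = second = 0
--     for step in chain_vulns:
--         r = _rank(step)
--         if r > best:
--             best, second = r, best
--         elif r > second:
--             second = r
--     score = best + second
--     if score >= 4:
--         return 'critical'
--     if score >= 2:
--         return 'high'
--     if score == 1:
--         return 'medium'
--     return 'low'
-- ===== Notes on version B (the rewrite author's own statement) =====
-- stated objective: alternative
-- what changed: Replaced the two category-count passes plus threshold cascade by mapping each step to a single severity rank (2/1/0), a selection scan keeping the two largest ranks, and classifying by their sum.
import Mathlib
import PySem

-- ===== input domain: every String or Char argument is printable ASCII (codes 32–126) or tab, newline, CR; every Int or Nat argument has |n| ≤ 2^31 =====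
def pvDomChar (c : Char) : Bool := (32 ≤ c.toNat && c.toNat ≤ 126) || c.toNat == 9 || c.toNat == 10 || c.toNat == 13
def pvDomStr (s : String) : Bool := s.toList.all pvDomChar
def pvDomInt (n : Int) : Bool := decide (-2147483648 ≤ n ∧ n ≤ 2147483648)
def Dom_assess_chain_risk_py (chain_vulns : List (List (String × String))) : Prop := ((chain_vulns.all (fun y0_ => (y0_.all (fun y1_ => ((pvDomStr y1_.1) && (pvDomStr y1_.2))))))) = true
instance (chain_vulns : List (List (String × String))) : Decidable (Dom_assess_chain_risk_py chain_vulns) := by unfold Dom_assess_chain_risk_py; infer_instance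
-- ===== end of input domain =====

-- B maps each step to one severity rank (2/1/0), keeps the two largest ranks by a
-- selection scan and classifies their sum, instead of A's two category counts + cascade.

-- ===== PORT A =====
def pvStepStr (step : List (String × String)) : String :=
  ((PySem.Dict.mk step).get? "step").getD ""

def assess_chain_risk_py (chain_vulns : List (List (String × String))) : String :=
  let high_risk_steps := ["rce", "command_injection", "file_upload", "sqli"]
  let medium_risk_steps := ["xss", "idor", "lfi", "ssrf"]
  let high_count : Int :=
    chain_vulns.countP (fun step => high_risk_steps.any (fun risk => PySem.Str.isIn risk (pvStepStr step)))
  let medium_count : Int :=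
    chain_vulns.countP (fun step => medium_risk_steps.any (fun risk => PySem.Str.isIn risk (pvStepStr step)))
  if high_count ≥ 2 then "critical"
  else if high_count ≥ 1 ∨ medium_count ≥ 2 then "high"
  else if medium_count ≥ 1 then "medium"
  else "low"

-- ===== PORT B =====
def pvRank (step : List (String × String)) : Int :=
  if ["rce", "command_injection", "file_upload", "sqli"].any (fun k => PySem.Str.isIn k (pvStepStr step)) then 2
  else if ["xss", "idor", "lfi", "ssrf"].any (fun k => PySem.Str.isIn k (pvStepStr step)) then 1
  else 0

def pvSel (bs : Int × Int) (step : List (String × String)) : Int × Int :=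
  if pvRank step > bs.1 then (pvRank step, bs.1)
  else if pvRank step > bs.2 then (bs.1, pvRank step)
  else bs

def assess_chain_risk_py_alt (chain_vulns : List (List (String × String))) : String :=
  let bs := chain_vulns.foldl pvSel (0, 0)
  let score := bs.1 + bs.2
  if score ≥ 4 then "critical"
  else if score ≥ 2 then "high"
  else if score = 1 then "medium"
  else "low"

-- ===== PRECONDITION & SPEC =====
-- Pre_ excludes inputs on which A raises KeyError: a step dict without a 'step' key.
def Pre_assess_chain_risk_py (chain_vulns : List (List (String × String))) : Prop :=
  ∀ step ∈ chain_vulns, "step" ∈ step.map (·.1)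
instance (chain_vulns : List (List (String × String))) : Decidable (Pre_assess_chain_risk_py chain_vulns) := by unfold Pre_assess_chain_risk_py; infer_instance
def pvWitness_assess_chain_risk_py : (List (List (String × String))) := [[("step", "rce chain")], [("step", "xss")]]

def Spec_assess_chain_risk_py (chain_vulns : List (List (String × String))) (out : String) : Prop := out = assess_chain_risk_py_alt chain_vulns
instance (chain_vulns : List (List (String × String))) (out : String) : Decidable (Spec_assess_chain_risk_py chain_vulns out) := by unfold Spec_assess_chain_risk_py; infer_instance

-- ===== CLAIM (what is proved, stated in full; the proofs are below) =====
def Claim_equal_assess_chain_risk_py : Prop := ∀ (chain_vulns : List (List (String × String))), Dom_assess_chain_risk_py chain_vulns → Pre_assess_chain_risk_py chain_vulns → Spec_assess_chain_risk_py chain_vulns (assess_chain_risk_py chain_vulns)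

-- ===== LEMMAS AND PROOFS =====

def pvHighP (step : List (String × String)) : Bool :=
  ["rce", "command_injection", "file_upload", "sqli"].any (fun risk => PySem.Str.isIn risk (pvStepStr step))
def pvMedP (step : List (String × String)) : Bool :=
  ["xss", "idor", "lfi", "ssrf"].any (fun risk => PySem.Str.isIn risk (pvStepStr step))
def pvR2 (step : List (String × String)) : Bool := pvRank step == 2
def pvR1 (step : List (String × String)) : Bool := pvRank step == 1

-- each step's rank is one of 2, 1, 0
theorem pvRank_cases (x : List (String × String)) :
    pvRank x = 2 ∨ pvRank x = 1 ∨ pvRank x = 0 := by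
  unfold pvRank; split_ifs <;> simp

-- the selection scan computes (largest, second largest) of the ranks, expressed via counts
set_option maxHeartbeats 2000000 in
theorem pvFold_eq (cv : List (List (String × String))) :
    cv.foldl pvSel (0, 0) =
      ((if 1 ≤ cv.countP pvR2 then 2 else if 1 ≤ cv.countP pvR1 then 1 else 0 : Int),
       (if 2 ≤ cv.countP pvR2 then 2 else if 2 ≤ cv.countP pvR2 + cv.countP pvR1 then 1 else 0 : Int)) := by
  induction cv using List.reverseRecOn with
  | nil => simp
  | append_singleton l x ih =>
    rw [List.foldl_append, ih]
    rcases pvRank_cases x with h | h | h <;>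
      simp only [List.foldl_cons, List.foldl_nil, List.countP_append, List.countP_cons,
        List.countP_nil, pvSel, pvR2, pvR1, beq_iff_eq, h] <;>
      split_ifs <;> first | rfl | omega

theorem pvCountR2 (cv : List (List (String × String))) :
    cv.countP pvR2 = cv.countP pvHighP := by
  refine List.countP_congr (fun x _ => ?_)
  have hb : pvR2 x = pvHighP x := by
    show (pvRank x == 2) = pvHighP x
    unfold pvRank pvHighP
    by_cases h1 : (["rce", "command_injection", "file_upload", "sqli"].any
        (fun k => PySem.Str.isIn k (pvStepStr x))) = true
    · rw [if_pos h1, h1]; decide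
    · rw [if_neg h1, eq_false_of_ne_true h1]
      split_ifs <;> decide
  rw [hb]

theorem pvCountR1 (cv : List (List (String × String))) (h0 : cv.countP pvHighP = 0) :
    cv.countP pvR1 = cv.countP pvMedP := by
  refine List.countP_congr (fun x hx => ?_)
  have hx0 : pvHighP x = false := by
    have := List.countP_eq_zero.mp h0 x hx; simpa using this
  have hb : (pvRank x == 1) = pvMedP x := by
    unfold pvRank
    unfold pvHighP at hx0
    rw [if_neg (by simp only [hx0]; exact Bool.false_ne_true)]
    unfold pvMedP
    split_ifs with h2
    · rw [h2]; decide
    · rw [eq_false_of_ne_true h2]; decide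
  rw [show pvR1 x = (pvRank x == 1) from rfl, hb]

-- ===== VERDICT (by name: the statement is the Claim_ definition above) =====
set_option maxHeartbeats 2000000 in
theorem assess_chain_risk_py_spec : Claim_equal_assess_chain_risk_py := by
  intro cv _ _
  show assess_chain_risk_py cv = assess_chain_risk_py_alt cv
  have ha : assess_chain_risk_py cv =
      (if (List.countP pvHighP cv : Int) ≥ 2 then "critical"
       else if (List.countP pvHighP cv : Int) ≥ 1 ∨ (List.countP pvMedP cv : Int) ≥ 2 then "high"
       else if (List.countP pvMedP cv : Int) ≥ 1 then "medium"
       else "low") := rfl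
  have hb : assess_chain_risk_py_alt cv =
      (fun bs : Int × Int =>
        if bs.1 + bs.2 ≥ 4 then "critical"
        else if bs.1 + bs.2 ≥ 2 then "high"
        else if bs.1 + bs.2 = 1 then "medium"
        else "low") (cv.foldl pvSel (0, 0)) := rfl
  rw [ha, hb, pvFold_eq, pvCountR2]
  by_cases h0 : cv.countP pvHighP = 0
  · rw [pvCountR1 cv h0, h0]
    dsimp only
    split_ifs <;> first | rfl | omega
  · dsimp only
    split_ifs <;> first | rfl | omega
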